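-- pv_equiv track=rewrite | github.com/frankpietro/superbrain | src/superbrain/scrapers/historical/merge.py | _combined_source_label
-- ===== SOURCE A (Python) =====
-- def _combined_source_label(columns: list[str]) -> str:
--     tags: list[str] = []
--     if any(c.startswith("fd_") for c in columns):
--         tags.append("football_data")
--     if any(c.startswith("us_") for c in columns):
--         tags.append("understat")
--     if any(c in {"canonical_team", "canonical_opponent"} for c in columns):
--         tags.append("fbref")
--     return "+".join(tags) if tags else "historical"
-- ===== SOURCE B (Python) =====
-- def _combined_source_label(columns: list[str]) -> str:
--     fd = us = fb = False
--     for c in columns: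
--         if c.startswith("fd_"):
--             fd = True
--         if c.startswith("us_"):
--             us = True
--         if c in ("canonical_team", "canonical_opponent"):
--             fb = True
--         if fd and us and fb:
--             break
--     parts = [name for flag, name in ((fd, "football_data"), (us, "understat"), (fb, "fbref")) if flag]
--     return "+".join(parts) if parts else "historical"
-- ===== Notes on version B (the rewrite author's own statement) =====
-- stated objective: alternative
-- what changed: Replaces three separate full scans of columns (one per tag) with a single pass maintaining three booleans that exits early once all three tags are found, then assembles the label from the flags.
import Mathlib
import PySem

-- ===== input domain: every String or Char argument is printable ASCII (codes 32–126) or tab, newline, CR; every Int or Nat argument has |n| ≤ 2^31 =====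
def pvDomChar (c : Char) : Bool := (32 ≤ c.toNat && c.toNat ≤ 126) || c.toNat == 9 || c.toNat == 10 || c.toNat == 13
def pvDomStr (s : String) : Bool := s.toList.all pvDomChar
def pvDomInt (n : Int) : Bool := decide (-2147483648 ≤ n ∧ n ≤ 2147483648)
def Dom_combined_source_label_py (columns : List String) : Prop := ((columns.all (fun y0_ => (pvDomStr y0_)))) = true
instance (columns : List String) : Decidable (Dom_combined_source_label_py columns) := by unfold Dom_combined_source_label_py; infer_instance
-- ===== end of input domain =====

-- B replaces A's three full scans by one early-exiting pass over columns maintaining three flags (alternative decomposition; same result).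

-- ===== PORT A =====
def combined_source_label_py (columns : List String) : String :=
  let tags : List String := []
  let tags := if columns.any (fun c => PySem.Str.startswith c "fd_") then tags ++ ["football_data"] else tags
  let tags := if columns.any (fun c => PySem.Str.startswith c "us_") then tags ++ ["understat"] else tags
  let tags := if columns.any (fun c => c == "canonical_team" || c == "canonical_opponent") then tags ++ ["fbref"] else tags
  if tags.isEmpty then "historical" else PySem.Str.join "+" tags

-- ===== PORT B =====
-- the single pass with early break
def cslAltLoop : List String → Bool → Bool → Bool → Bool × Bool × Bool
  | [], fd, us, fb => (fd, us, fb)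
  | c :: rest, fd, us, fb =>
    let fd := fd || PySem.Str.startswith c "fd_"
    let us := us || PySem.Str.startswith c "us_"
    let fb := fb || (c == "canonical_team" || c == "canonical_opponent")
    if fd && us && fb then (fd, us, fb) else cslAltLoop rest fd us fb

def combined_source_label_py_alt (columns : List String) : String :=
  let (fd, us, fb) := cslAltLoop columns false false false
  let parts := ([(fd, "football_data"), (us, "understat"), (fb, "fbref")].filter (fun p => p.1)).map (fun p => p.2)
  if parts.isEmpty then "historical" else PySem.Str.join "+" parts

-- ===== PRECONDITION & SPEC =====
def Spec_combined_source_label_py (columns : List String) (out : String) : Prop := out = combined_source_label_py_alt columns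
instance (columns : List String) (out : String) : Decidable (Spec_combined_source_label_py columns out) := by unfold Spec_combined_source_label_py; infer_instance

-- ===== CLAIM (what is proved, stated in full; the proofs are below) =====
def Claim_equal_combined_source_label_py : Prop := ∀ (columns : List String), Dom_combined_source_label_py columns → Spec_combined_source_label_py columns (combined_source_label_py columns)

-- ===== LEMMAS AND PROOFS =====

theorem cslAltLoop_eq (columns : List String) : ∀ (fd us fb : Bool),
    cslAltLoop columns fd us fb =
      (fd || columns.any (fun c => PySem.Str.startswith c "fd_"),
       us || columns.any (fun c => PySem.Str.startswith c "us_"),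
       fb || columns.any (fun c => c == "canonical_team" || c == "canonical_opponent")) := by
  induction columns with
  | nil => intro fd us fb; simp [cslAltLoop]
  | cons c rest ih =>
    intro fd us fb
    simp only [cslAltLoop, List.any_cons]
    split
    · rename_i h
      simp only [Bool.and_eq_true] at h
      obtain ⟨⟨h1, h2⟩, h3⟩ := h
      simp only [← Bool.or_assoc, h1, h2, h3, Bool.true_or]
    · rw [ih]
      simp [Bool.or_assoc]

theorem combined_source_label_py_eq (columns : List String) :
    combined_source_label_py columns = combined_source_label_py_alt columns := by
  unfold combined_source_label_py combined_source_label_py_alt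
  rw [cslAltLoop_eq]
  rcases h1 : columns.any (fun c => PySem.Str.startswith c "fd_") <;>
  rcases h2 : columns.any (fun c => PySem.Str.startswith c "us_") <;>
  rcases h3 : columns.any (fun c => c == "canonical_team" || c == "canonical_opponent") <;>
  simp [List.filter, List.map]

-- ===== VERDICT (by name: the statement is the Claim_ definition above) =====
theorem combined_source_label_py_spec : Claim_equal_combined_source_label_py := by
  intro columns _
  unfold Spec_combined_source_label_py
  exact combined_source_label_py_eq columns
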